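-- pv_equiv track=rewrite | github.com/xiangyu-975/Stream_Lit | login_auth_ui/utils.py | non_empty_str_check
-- ===== SOURCE A (Python) =====
-- def non_empty_str_check(username_sign_up: str) -> bool:
--     """检查字符串是否为空"""
--     empty_count = 0
--     for i in username_sign_up:
--         if i == ' ':
--             empty_count += 1
--             if empty_count == len(username_sign_up):
--                 return False
--
--     if not username_sign_up:
--         return False
--     return True
-- ===== SOURCE B (Python) =====
-- def non_empty_str_check(username_sign_up: str) -> bool:
--     """检查字符串是否为空"""
--     return bool(username_sign_up) and set(username_sign_up) != {' '}
-- ===== Notes on version B (the rewrite author's own statement) =====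
-- stated objective: simpler
-- what changed: Replaces the space-counting loop with early return by a one-line check that the string is non-empty and its set of distinct characters differs from the singleton space set.
import Mathlib
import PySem

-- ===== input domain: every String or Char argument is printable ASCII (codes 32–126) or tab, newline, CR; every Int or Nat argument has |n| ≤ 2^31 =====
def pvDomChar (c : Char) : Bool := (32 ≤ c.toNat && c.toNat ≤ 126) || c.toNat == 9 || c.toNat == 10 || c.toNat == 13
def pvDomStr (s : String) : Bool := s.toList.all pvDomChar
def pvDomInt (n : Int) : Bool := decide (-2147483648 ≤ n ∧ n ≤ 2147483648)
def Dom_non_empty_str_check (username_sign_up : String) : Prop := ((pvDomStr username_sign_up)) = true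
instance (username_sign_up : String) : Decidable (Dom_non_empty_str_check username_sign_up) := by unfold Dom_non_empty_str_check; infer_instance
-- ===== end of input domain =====

-- B replaces A's space-counting loop with early return by a one-line check: non-empty and the set
-- of distinct characters is not {' '} (objective: simpler).

-- ===== PORT A =====
-- loop 'for i in username_sign_up', carrying empty_count; 'some false' models the early 'return False'
def nescLoop (n : Nat) : List Char → Nat → Option Bool
  | [], _ => none
  | c :: rest, cnt =>
    if c = ' ' then
      if cnt + 1 = n then some false else nescLoop n rest (cnt + 1)
    else nescLoop n rest cnt

def non_empty_str_check (username_sign_up : String) : Bool :=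
  match nescLoop username_sign_up.toList.length username_sign_up.toList 0 with
  | some b => b
  | none => if username_sign_up.toList.length = 0 then false else true

-- ===== PORT B =====
def non_empty_str_check_alt (username_sign_up : String) : Bool :=
  decide (username_sign_up.toList.length ≠ 0) &&
    !(PySem.Set.equal (PySem.Set.ofList username_sign_up.toList) ([' '] : PySem.Set Char))

-- ===== PRECONDITION & SPEC =====
def Spec_non_empty_str_check (username_sign_up : String) (out : Bool) : Prop := out = non_empty_str_check_alt username_sign_up
instance (username_sign_up : String) (out : Bool) : Decidable (Spec_non_empty_str_check username_sign_up out) := by unfold Spec_non_empty_str_check; infer_instance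

-- ===== CLAIM (what is proved, stated in full; the proofs are below) =====
def Claim_equal_non_empty_str_check : Prop := ∀ (username_sign_up : String), Dom_non_empty_str_check username_sign_up → Spec_non_empty_str_check username_sign_up (non_empty_str_check username_sign_up)

-- ===== LEMMAS AND PROOFS =====

theorem nescLoop_lt (l : List Char) (n cnt : Nat) (h : cnt + l.length < n) :
    nescLoop n l cnt = none := by
  induction l generalizing cnt with
  | nil => rfl
  | cons c rest ih =>
    simp only [nescLoop]
    simp only [List.length_cons] at h
    split
    · rw [if_neg (by omega)]
      exact ih (cnt + 1) (by omega)
    · exact ih cnt (by omega)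

theorem nescLoop_eq (l : List Char) (n cnt : Nat) (h : cnt + l.length = n) :
    nescLoop n l cnt = if l ≠ [] ∧ ∀ c ∈ l, c = ' ' then some false else none := by
  induction l generalizing cnt with
  | nil => simp [nescLoop]
  | cons c rest ih =>
    simp only [nescLoop]
    simp only [List.length_cons] at h
    by_cases hc : c = ' '
    · rw [if_pos hc]
      by_cases hr : rest = []
      · subst hr
        simp only [List.length_nil] at h
        rw [if_pos (by omega)]
        rw [if_pos ⟨by simp, by simpa using hc⟩]
      · rw [if_neg (by have hl : 0 < rest.length := List.length_pos_iff.mpr hr; omega)]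
        rw [ih (cnt + 1) (by omega)]
        simp only [hr, ne_eq, not_false_iff, true_and]
        by_cases hall : ∀ x ∈ rest, x = ' '
        · rw [if_pos hall, if_pos ⟨by simp, by simpa [hc] using hall⟩]
        · rw [if_neg hall, if_neg (by simp only [List.mem_cons]; rintro ⟨-, h2⟩; exact hall fun x hx => h2 x (Or.inr hx))]
    · rw [if_neg hc]
      rw [nescLoop_lt rest n cnt (by omega)]
      rw [if_neg (by rintro ⟨-, h2⟩; exact hc (h2 c (by simp)))]

theorem set_eq_singleton_space (l : List Char) :
    PySem.Set.equal (PySem.Set.ofList l) ([' '] : PySem.Set Char) =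
      decide (l ≠ [] ∧ ∀ c ∈ l, c = ' ') := by
  by_cases h : l ≠ [] ∧ ∀ c ∈ l, c = ' '
  · have : PySem.Set.ofList l = [' '] := by
      obtain ⟨hne, hall⟩ := h
      have : l = List.replicate l.length ' ' := List.eq_replicate_length.mpr hall
      rw [this]
      cases hl : l.length with
      | zero => exact absurd (List.length_eq_zero_iff.mp hl) hne
      | succ k =>
        clear this hl
        induction k with
        | zero => rfl
        | succ m ihm =>
          rw [List.replicate_succ']
          rw [PySem.Set.ofList_append, ihm]
          rfl
    rw [this, decide_eq_true h]
    rfl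
  · rw [decide_eq_false h]
    rw [not_and_or] at h
    rcases h with h | h
    · simp only [ne_eq, not_not] at h
      subst h; rfl
    · push Not at h
      obtain ⟨c, hc, hcs⟩ := h
      have hmem : c ∈ PySem.Set.ofList l := by
        rw [PySem.Set.mem_ofList]; exact hc
      by_contra hfalse
      simp only [Bool.not_eq_false] at hfalse
      have := (PySem.Set.equal_iff _ _).mp hfalse
      have : c ∈ ([' '] : PySem.Set Char) := (this c).mp hmem
      simp at this
      exact hcs this

-- ===== VERDICT (by name: the statement is the Claim_ definition above) =====
theorem non_empty_str_check_spec : Claim_equal_non_empty_str_check := by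
  intro s _
  unfold Spec_non_empty_str_check non_empty_str_check non_empty_str_check_alt
  rw [nescLoop_eq s.toList s.toList.length 0 (by omega)]
  rw [set_eq_singleton_space]
  by_cases h : s.toList ≠ [] ∧ ∀ c ∈ s.toList, c = ' '
  · rw [if_pos h, decide_eq_true h]
    simp
  · rw [if_neg h, decide_eq_false h]
    by_cases he : s.toList.length = 0
    · simp [he]
    · simp only [he, decide_not]
      simp
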